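-- pv_equiv track=rewrite | github.com/nkoech/CIAT_File_Benders | Python Scripts/XML_to_CSV/xmltocsv.py | _get_csv_values
-- ===== SOURCE A (Python) =====
-- def _get_csv_values(id_range, xml_items):
--     """
--     Get values to be used in CSV file creation
--     :param id_range: Unique tag identifiers
--     :param xml_items: List object with xml items
--     :return: Dictionary with CSV values
--     :rtype: Dictionary object
--     """
--     csv_values = {}
--     for tag_id in id_range:
--         tag_values = {}
--         blank_values = {}
--         column_headers = []
--         for count, xml_item in enumerate(xml_items):
--             if xml_item[0][1] == tag_id:
--                 tag_key = xml_item[1][0]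
--                 tag_value = xml_item[1][1]
--                 if tag_key not in set(column_headers):
--                     tag_values[tag_key] = tag_value
--                     blank_values[tag_key] = ''
--                     column_headers.append(tag_key)
--         csv_values[tag_id] = (tag_values, column_headers, blank_values)
--     return csv_values
-- ===== SOURCE B (Python) =====
-- def _get_csv_values(id_range, xml_items):
--     # One pass over xml_items: dedupe (tag id, key) pairs with a seen-set and collect each
--     # tag id's first-occurrence (key, value) pairs; the triples are derived from the pair
--     # lists afterwards instead of being maintained during the scan.
--     seen = set()
--     pairs = {}
--     for (_, tid), kv in xml_items:
--         if (tid, kv[0]) not in seen: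
--             seen.add((tid, kv[0]))
--             pairs.setdefault(tid, []).append(kv)
--     result = {}
--     for tid in id_range:
--         kvs = pairs.get(tid, [])
--         result[tid] = (dict(kvs), [k for k, _ in kvs], {k: '' for k, _ in kvs})
--     return result
-- ===== Notes on version B (the rewrite author's own statement) =====
-- stated objective: faster
-- what changed: B makes one pass over xml_items deduplicating (tag id, key) pairs with a seen-set and collecting each tag id's first-occurrence (key, value) pair list, then derives each id's (values, headers, blanks) triple from its pair list, instead of A's rescan of all xml_items for every tag id with set(column_headers) rebuilt per item.
import Mathlib
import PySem

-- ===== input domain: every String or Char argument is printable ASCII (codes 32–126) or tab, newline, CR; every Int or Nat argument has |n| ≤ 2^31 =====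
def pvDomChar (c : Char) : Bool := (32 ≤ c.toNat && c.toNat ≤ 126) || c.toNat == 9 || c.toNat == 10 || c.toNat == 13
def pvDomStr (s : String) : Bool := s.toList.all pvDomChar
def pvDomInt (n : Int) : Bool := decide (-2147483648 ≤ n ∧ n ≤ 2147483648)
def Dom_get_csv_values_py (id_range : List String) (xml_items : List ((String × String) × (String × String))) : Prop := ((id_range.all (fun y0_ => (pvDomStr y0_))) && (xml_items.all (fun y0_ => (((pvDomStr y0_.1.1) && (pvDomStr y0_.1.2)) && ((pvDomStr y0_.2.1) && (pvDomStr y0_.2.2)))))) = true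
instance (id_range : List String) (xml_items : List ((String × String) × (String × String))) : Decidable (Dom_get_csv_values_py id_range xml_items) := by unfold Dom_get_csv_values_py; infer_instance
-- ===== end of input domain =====

-- B scans xml_items ONCE, deduplicating (tag id, key) pairs with a seen-set and collecting
-- each tag id's first-occurrence (key, value) pair list; the per-id triples are derived from
-- those pair lists afterwards.  Same return value on every input.

-- the per-tag value (tag_values, column_headers, blank_values)
abbrev pvTriple : Type := PySem.Dict String String × List String × PySem.Dict String String

def pvInit : pvTriple := (PySem.Dict.empty, [], PySem.Dict.empty)

-- ===== PORT A =====
-- body of A's inner 'for count, xml_item in enumerate(xml_items)' loop (count is unused,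
-- so the fold carries no index)
def pvStepA (tag_id : String) (st : pvTriple) (xml_item : (String × String) × (String × String)) : pvTriple :=
  if xml_item.1.2 == tag_id then
    let tag_key := xml_item.2.1
    let tag_value := xml_item.2.2
    if (PySem.Set.ofList st.2.1).contains tag_key then st
    else (st.1.insert tag_key tag_value, st.2.1 ++ [tag_key], st.2.2.insert tag_key "")
  else st

def get_csv_values_py (id_range : List String) (xml_items : List ((String × String) × (String × String))) : List (String × (List (String × String)) × List String × (List (String × String))) :=
  let csv_values := id_range.foldl
    (fun csv tag_id => csv.insert tag_id (xml_items.foldl (pvStepA tag_id) pvInit))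
    PySem.Dict.empty
  csv_values.items.map (fun p => (p.1, p.2.1.items, p.2.2.1, p.2.2.2.items))

-- ===== PORT B =====
-- B's scan state: the seen-set of (tag id, key) pairs and the dict tid -> pair list
abbrev pvScan : Type := PySem.Set (String × String) × PySem.Dict String (List (String × String))

-- body of B's single loop; 'pairs.setdefault(tid, []).append(kv)' appends to the stored
-- list in place, i.e. stores getD tid [] ++ [kv] back under tid
def pvStepB (st : pvScan) (x : (String × String) × (String × String)) : pvScan :=
  let tid := x.1.2
  let kv := x.2
  if st.1.contains (tid, kv.1) then st
  else (st.1.add (tid, kv.1), st.2.insert tid (st.2.getD tid [] ++ [kv]))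

-- '(dict(kvs), [k for k, _ in kvs], {k: '' for k, _ in kvs})' — dict(kvs) built by insertion
def pvTripleOf (kvs : List (String × String)) : pvTriple :=
  (kvs.foldl (fun d p => d.insert p.1 p.2) PySem.Dict.empty,
   kvs.map Prod.fst,
   kvs.foldl (fun d p => d.insert p.1 "") PySem.Dict.empty)

def get_csv_values_py_alt (id_range : List String) (xml_items : List ((String × String) × (String × String))) : List (String × (List (String × String)) × List String × (List (String × String))) :=
  let pairs := (xml_items.foldl pvStepB (PySem.Set.empty, PySem.Dict.empty)).2
  let result := id_range.foldl
    (fun r tid => r.insert tid (pvTripleOf (pairs.getD tid [])))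
    PySem.Dict.empty
  result.items.map (fun p => (p.1, p.2.1.items, p.2.2.1, p.2.2.2.items))

-- ===== PRECONDITION & SPEC =====
def Spec_get_csv_values_py (id_range : List String) (xml_items : List ((String × String) × (String × String))) (out : List (String × (List (String × String)) × List String × (List (String × String)))) : Prop := out = get_csv_values_py_alt id_range xml_items
instance (id_range : List String) (xml_items : List ((String × String) × (String × String))) (out : List (String × (List (String × String)) × List String × (List (String × String)))) : Decidable (Spec_get_csv_values_py id_range xml_items out) := by unfold Spec_get_csv_values_py; infer_instance

-- ===== CLAIM (what is proved, stated in full; the proofs are below) =====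
def Claim_equal_get_csv_values_py : Prop := ∀ (id_range : List String) (xml_items : List ((String × String) × (String × String))), Dom_get_csv_values_py id_range xml_items → Spec_get_csv_values_py id_range xml_items (get_csv_values_py id_range xml_items)

-- ===== LEMMAS AND PROOFS =====

-- the seen-set holds exactly the (tid, key) pairs already collected in the pair lists
def pvInvB (st : pvScan) : Prop :=
  ∀ t k, ((t, k) ∈ st.1 ↔ k ∈ (st.2.getD t []).map Prod.fst)

lemma pvInvB_empty : pvInvB (PySem.Set.empty, PySem.Dict.empty) := by
  intro t k
  simp [PySem.Set.empty, PySem.Dict.getD_empty]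

-- B's one step, read back at tid through pvTripleOf, is A's step for tid
lemma pvStep_agree (st : pvScan) (hb : pvInvB st)
    (x : (String × String) × (String × String)) (tid : String) :
    pvStepA tid (pvTripleOf (st.2.getD tid [])) x
      = pvTripleOf ((pvStepB st x).2.getD tid []) := by
  unfold pvStepA pvStepB
  simp only [pvTripleOf]
  by_cases ht : x.1.2 = tid
  · rw [if_pos (by simp [ht])]
    by_cases hm : x.2.1 ∈ (st.2.getD tid []).map Prod.fst
    · rw [if_pos ((PySem.Set.contains_iff _ _).mpr ((PySem.Set.mem_ofList _ _).mpr hm))]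
      rw [if_pos ((PySem.Set.contains_iff _ _).mpr ((hb x.1.2 x.2.1).mpr (by rw [ht]; exact hm)))]
    · rw [if_neg (fun h => hm ((PySem.Set.mem_ofList _ _).mp ((PySem.Set.contains_iff _ _).mp h)))]
      rw [if_neg (fun h => hm (by
        have hmem := (hb x.1.2 x.2.1).mp ((PySem.Set.contains_iff _ _).mp h)
        rw [ht] at hmem; exact hmem))]
      simp only [PySem.Dict.getD_insert, if_pos ht.symm]
      rw [ht]
      simp [List.foldl_append]
  · rw [if_neg (by simp [ht])]
    by_cases hs : st.1.contains (x.1.2, x.2.1) = true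
    · rw [if_pos hs]
    · rw [if_neg hs]
      simp only [PySem.Dict.getD_insert, if_neg (fun e : tid = x.1.2 => ht e.symm)]

lemma pvInvB_step (st : pvScan) (hb : pvInvB st)
    (x : (String × String) × (String × String)) : pvInvB (pvStepB st x) := by
  unfold pvStepB
  by_cases hs : st.1.contains (x.1.2, x.2.1) = true
  · rw [if_pos hs]; exact hb
  · rw [if_neg hs]
    intro t k
    simp only [PySem.Set.mem_add, PySem.Dict.getD_insert]
    by_cases ht : t = x.1.2
    · subst ht
      rw [if_pos rfl]
      simp only [List.map_append, List.mem_append, List.map_cons, List.map_nil,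
        List.mem_cons, List.not_mem_nil, or_false]
      constructor
      · rintro (h | h)
        · exact Or.inl ((hb x.1.2 k).mp h)
        · exact Or.inr (congrArg Prod.snd h)
      · rintro (h | h)
        · exact Or.inl ((hb x.1.2 k).mpr h)
        · exact Or.inr (by rw [h])
    · rw [if_neg ht]
      constructor
      · rintro (h | h)
        · exact (hb t k).mp h
        · exact absurd (congrArg Prod.fst h) ht
      · exact fun h => Or.inl ((hb t k).mpr h)

-- the core: A's inner loop for tid equals the pvTripleOf of B's collected pair list
lemma pvCore (xs : List ((String × String) × (String × String))) :
    ∀ (st : pvScan), pvInvB st → ∀ tid,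
      xs.foldl (pvStepA tid) (pvTripleOf (st.2.getD tid []))
        = pvTripleOf ((xs.foldl pvStepB st).2.getD tid []) := by
  induction xs with
  | nil => intro st _ tid; rfl
  | cons x xs ih =>
      intro st hb tid
      simp only [List.foldl_cons]
      rw [pvStep_agree st hb x tid]
      exact ih (pvStepB st x) (pvInvB_step st hb x) tid

-- folding inserts of pointwise-equal values builds the same dict
lemma pvOuter (f g : String → pvTriple) (h : ∀ t, f t = g t) (ids : List String) :
    ∀ acc : PySem.Dict String pvTriple,
      ids.foldl (fun c tid => c.insert tid (f tid)) acc
        = ids.foldl (fun c tid => c.insert tid (g tid)) acc := by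
  induction ids with
  | nil => intro acc; rfl
  | cons i ids ih => intro acc; simp only [List.foldl_cons, h i]; exact ih _

-- ===== VERDICT (by name: the statement is the Claim_ definition above) =====
theorem get_csv_values_py_spec : Claim_equal_get_csv_values_py := by
  intro id_range xml_items _
  unfold Spec_get_csv_values_py get_csv_values_py get_csv_values_py_alt
  simp only
  congr 1
  have hfun : ∀ t : String, xml_items.foldl (pvStepA t) pvInit
      = pvTripleOf ((xml_items.foldl pvStepB (PySem.Set.empty, PySem.Dict.empty)).2.getD t []) := by
    intro t
    have := pvCore xml_items (PySem.Set.empty, PySem.Dict.empty) pvInvB_empty t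
    rwa [PySem.Dict.getD_empty] at this
  exact congrArg PySem.Dict.items (pvOuter _ _ hfun id_range PySem.Dict.empty)
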